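-- pv_equiv track=rewrite | github.com/981377660LMT/algorithm-study | 1_stack/连续相邻元素消除问题/京东-相邻都不相等的最小变化次数.py | solve
-- ===== SOURCE A (Python) =====
-- def solve(s: str) -> int:
--     res = 0
--     n = len(s)
--     i = 0
--     while i < n - 1:
--         if s[i] == s[i + 1]:
--             if i + 2 < n and s[i] == s[i + 2]:
--                 i += 2
--                 res += 1
--             else:
--                 i += 1
--                 res += 1
--         else:
--             i += 1
--     return res
-- ===== SOURCE B (Python) =====
-- def solve(s: str) -> int:
--     # group s into maximal runs of equal characters, sum len(run)//2
--     lengths = []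
--     cur = None
--     cnt = 0
--     for ch in s:
--         if ch == cur:
--             cnt += 1
--         else:
--             if cnt:
--                 lengths.append(cnt)
--             cur = ch
--             cnt = 1
--     if cnt:
--         lengths.append(cnt)
--     return sum(L // 2 for L in lengths)
-- ===== Notes on version B (the rewrite author's own statement) =====
-- stated objective: simpler
-- what changed: Replaces A's variable-step index pointer that peeks s[i+1]/s[i+2] with a group-then-reduce pass: collect maximal run lengths in one sweep and sum L//2 per run.
import Mathlib
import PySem

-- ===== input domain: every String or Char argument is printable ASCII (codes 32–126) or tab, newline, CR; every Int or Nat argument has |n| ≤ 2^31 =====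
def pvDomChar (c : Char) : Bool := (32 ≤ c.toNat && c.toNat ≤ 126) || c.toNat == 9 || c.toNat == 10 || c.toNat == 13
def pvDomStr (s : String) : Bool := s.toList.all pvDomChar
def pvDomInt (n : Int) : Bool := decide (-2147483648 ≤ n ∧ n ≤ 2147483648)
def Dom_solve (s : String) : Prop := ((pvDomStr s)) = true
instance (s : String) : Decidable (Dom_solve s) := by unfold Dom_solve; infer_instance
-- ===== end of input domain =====

-- B groups s into maximal runs of equal chars and sums len(run)//2, replacing A's variable-step index walk (objective: simpler decomposition).

-- ===== PORT A =====
-- while loop over index i with accumulator res; the branch guards keep every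
-- index read in range, so getD's default char is never used (exact port).
def solveLoop (cs : List Char) (n : Nat) (i : Nat) (res : Int) : Int :=
  if i < n - 1 then
    if cs.getD i ' ' = cs.getD (i+1) ' ' then
      if i + 2 < n ∧ cs.getD i ' ' = cs.getD (i+2) ' ' then
        solveLoop cs n (i+2) (res+1)
      else
        solveLoop cs n (i+1) (res+1)
    else
      solveLoop cs n (i+1) res
  else res
termination_by n - i
decreasing_by all_goals omega

def solve (s : String) : Int := solveLoop s.toList s.toList.length 0 0

-- ===== PORT B =====
-- run-length pass: carry the current run's char and count, emit the count when the char changes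
def runGo (c : Char) (len : Nat) : List Char → List Nat
  | [] => [len]
  | d :: rest => if d = c then runGo c (len+1) rest else len :: runGo d 1 rest

def runLengths : List Char → List Nat
  | [] => []
  | c :: rest => runGo c 1 rest

def solve_alt (s : String) : Int :=
  (((runLengths s.toList).map (fun L => L / 2)).sum : Nat)

-- ===== PRECONDITION & SPEC =====
def Spec_solve (s : String) (out : Int) : Prop := out = solve_alt s
instance (s : String) (out : Int) : Decidable (Spec_solve s out) := by unfold Spec_solve; infer_instance

-- ===== CLAIM (what is proved, stated in full; the proofs are below) =====
def Claim_equal_solve : Prop := ∀ (s : String), Dom_solve s → Spec_solve s (solve s)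

-- ===== LEMMAS AND PROOFS =====

-- S l = B's sum of L/2 over the runs of l (as a Nat)
def S (l : List Char) : Nat := ((runLengths l).map (fun L => L / 2)).sum

theorem runGo_sum_add_two (l : List Char) : ∀ (c : Char) (len : Nat),
    ((runGo c (len+2) l).map (fun L => L / 2)).sum
      = 1 + ((runGo c len l).map (fun L => L / 2)).sum := by
  induction l with
  | nil => intro c len; simp [runGo]; omega
  | cons d rest ih =>
    intro c len
    by_cases h : d = c
    · simp only [runGo, h, if_true]
      simpa using ih c (len+1)
    · simp [runGo, h]
      omega

theorem runGo_zero_sum (rest : List Char) (a : Char) :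
    ((runGo a 0 rest).map (fun L => L / 2)).sum = S rest := by
  cases rest with
  | nil => simp [runGo, S, runLengths]
  | cons d r =>
    by_cases h : d = a
    · subst h; simp [runGo, S, runLengths]
    · simp [runGo, h, S, runLengths]

theorem S_pair (a : Char) (rest : List Char) : S (a :: a :: rest) = 1 + S rest := by
  have h2 : S (a :: a :: rest) = ((runGo a 2 rest).map (fun L => L / 2)).sum := by
    simp [S, runLengths, runGo]
  rw [h2, runGo_sum_add_two rest a 0, runGo_zero_sum]

theorem S_ne (a b : Char) (rest : List Char) (h : a ≠ b) :
    S (a :: b :: rest) = S (b :: rest) := by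
  have hba : ¬ b = a := fun he => h he.symm
  simp [S, runLengths, runGo, if_neg hba]

theorem solveLoop_eq (k : Nat) (cs : List Char) (i : Nat) (res : Int)
    (hk : cs.length - i ≤ k) :
    solveLoop cs cs.length i res = res + (S (cs.drop i) : Int) := by
  induction k generalizing i res with
  | zero =>
    have hge : cs.length ≤ i := by omega
    have hlt : ¬ i < cs.length - 1 := by omega
    rw [solveLoop, if_neg hlt]
    rw [List.drop_eq_nil_of_le hge]
    simp [S, runLengths]
  | succ k ih =>
    by_cases h : i < cs.length - 1
    · have hi : i < cs.length := by omega
      have hi1 : i + 1 < cs.length := by omega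
      have d0 : cs.drop i = cs[i] :: cs.drop (i+1) := List.drop_eq_getElem_cons hi
      have d1 : cs.drop (i+1) = cs[i+1] :: cs.drop (i+2) := List.drop_eq_getElem_cons hi1
      have g0 : cs.getD i ' ' = cs[i] := List.getD_eq_getElem cs ' ' hi
      have g1 : cs.getD (i+1) ' ' = cs[i+1] := List.getD_eq_getElem cs ' ' hi1
      rw [solveLoop, if_pos h]
      by_cases hab : cs[i] = cs[i+1]
      · rw [if_pos (by rw [g0, g1, hab])]
        by_cases hc : i + 2 < cs.length ∧ cs.getD i ' ' = cs.getD (i+2) ' '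
        · -- s[i]==s[i+1] and s[i]==s[i+2]: i += 2, res += 1
          rw [if_pos hc, ih (i+2) (res+1) (by omega)]
          rw [d0, d1, ← hab, S_pair]
          push_cast; ring
        · -- s[i]==s[i+1] only: i += 1, res += 1
          rw [if_neg hc, ih (i+1) (res+1) (by omega)]
          have key : S (cs.drop i) = 1 + S (cs.drop (i+1)) := by
            by_cases h2 : i + 2 < cs.length
            · have g2 : cs.getD (i+2) ' ' = cs[i+2] := List.getD_eq_getElem cs ' ' h2
              have hne : cs[i] ≠ cs[i+2] := by
                intro he; exact hc ⟨h2, by rw [g0, g2, he]⟩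
              have d2 : cs.drop (i+2) = cs[i+2] :: cs.drop (i+3) := List.drop_eq_getElem_cons h2
              rw [d0, d1, d2, ← hab, S_pair, S_ne cs[i] (cs[i+2]) _ hne]
            · have hn : cs.length = i + 2 := by omega
              have e2 : cs.drop (i+2) = [] := List.drop_eq_nil_of_le (by omega)
              rw [d0, d1, e2, ← hab, S_pair]
              simp [S, runLengths, runGo]
          rw [key]; push_cast; ring
      · -- s[i] != s[i+1]: i += 1
        rw [if_neg (by rw [g0, g1]; exact hab), ih (i+1) res (by omega)]
        rw [d0, d1, S_ne cs[i] (cs[i+1]) _ hab, ← d1]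
    · rw [solveLoop, if_neg h]
      have hlen : (cs.drop i).length ≤ 1 := by simp; omega
      match hd : cs.drop i with
      | [] => simp [S, runLengths]
      | [x] => simp [S, runLengths, runGo]
      | x :: y :: r => rw [hd] at hlen; simp at hlen

-- ===== VERDICT (by name: the statement is the Claim_ definition above) =====
theorem solve_spec : Claim_equal_solve := by
  intro s _
  unfold Spec_solve solve solve_alt
  rw [solveLoop_eq s.toList.length s.toList 0 0 (by omega)]
  simp [S]
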